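-- pv_equiv track=rewrite | github.com/TipsyCanoe/Autism-Spectrum-Disorder-ASD-Treatment-Database | backend/backend-neon-connection-test.py | matches_text_query
-- ===== SOURCE A (Python) =====
-- def matches_text_query(study, query):
--     """Check if study matches the text query"""
--     if not query:
--         return True
--
--     # Combine all searchable fields
--     searchable_text = " ".join([
--         study.get("Study Title", ""),
--         study.get("Primary Outcome Area", ""),
--         study.get("Secondary Outcome Area", ""),
--         study.get("Results: Primary measure", ""),
--         study.get("Results: Secondary Measures", ""),
--         study.get("Tolerability/Side Effects", ""),
--         study.get("Safety", "")
--     ]).lower()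
--
--     query_terms = query.lower().split()
--     return all(term in searchable_text for term in query_terms)
-- ===== SOURCE B (Python) =====
-- _SEARCH_FIELDS = (
--     "Study Title",
--     "Primary Outcome Area",
--     "Secondary Outcome Area",
--     "Results: Primary measure",
--     "Results: Secondary Measures",
--     "Tolerability/Side Effects",
--     "Safety",
-- )
--
--
-- def matches_text_query(study, query):
--     """Check if study matches the text query"""
--     if not query:
--         return True
--     fields = [study.get(k, "").lower() for k in _SEARCH_FIELDS]
--     return all(any(term in f for f in fields) for term in query.lower().split())
-- ===== Notes on version B (the rewrite author's own statement) =====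
-- stated objective: alternative
-- what changed: B drops the ' '.join concatenation: it lowercases the seven fields individually and checks each query term against each field (term x field nested scan) instead of scanning one joined string; equivalent because split() terms contain no whitespace, so no match can span the join boundary.
import Mathlib
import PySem

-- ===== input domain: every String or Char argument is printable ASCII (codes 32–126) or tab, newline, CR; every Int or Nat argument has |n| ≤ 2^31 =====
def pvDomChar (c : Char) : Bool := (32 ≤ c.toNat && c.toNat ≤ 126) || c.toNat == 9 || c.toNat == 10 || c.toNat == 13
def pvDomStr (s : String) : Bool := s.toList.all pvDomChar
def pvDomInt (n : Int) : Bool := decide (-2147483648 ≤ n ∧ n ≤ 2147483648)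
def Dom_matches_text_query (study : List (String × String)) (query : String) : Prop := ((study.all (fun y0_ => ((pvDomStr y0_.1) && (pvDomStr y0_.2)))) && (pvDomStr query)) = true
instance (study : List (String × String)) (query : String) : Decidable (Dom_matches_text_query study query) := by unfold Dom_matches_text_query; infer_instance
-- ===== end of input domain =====

-- B checks each query term against the seven lowered fields individually instead of against one " "-joined lowered string (different decomposition; equivalent since split() terms contain no whitespace).


-- ===== PORT A =====
def matches_text_query (study : List (String × String)) (query : String) : Bool :=
  if query.toList = [] then true
  else
    let d : PySem.Dict String String := PySem.Dict.mk study
    let searchable_text : String :=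
      PySem.Str.lower (PySem.Str.join " "
        [d.getD "Study Title" "",
         d.getD "Primary Outcome Area" "",
         d.getD "Secondary Outcome Area" "",
         d.getD "Results: Primary measure" "",
         d.getD "Results: Secondary Measures" "",
         d.getD "Tolerability/Side Effects" "",
         d.getD "Safety" ""])
    let query_terms := PySem.Str.split₀ (PySem.Str.lower query)
    query_terms.all (fun term => PySem.Str.isIn term searchable_text)

-- ===== PORT B =====
def pvSearchFields : List String :=
  ["Study Title", "Primary Outcome Area", "Secondary Outcome Area",
   "Results: Primary measure", "Results: Secondary Measures",
   "Tolerability/Side Effects", "Safety"]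

def matches_text_query_alt (study : List (String × String)) (query : String) : Bool :=
  if query.toList = [] then true
  else
    let d : PySem.Dict String String := PySem.Dict.mk study
    let fields := pvSearchFields.map (fun k => PySem.Str.lower (d.getD k ""))
    (PySem.Str.split₀ (PySem.Str.lower query)).all
      (fun term => fields.any (fun f => PySem.Str.isIn term f))

-- ===== PRECONDITION & SPEC =====
def Spec_matches_text_query (study : List (String × String)) (query : String) (out : Bool) : Prop := out = matches_text_query_alt study query
instance (study : List (String × String)) (query : String) (out : Bool) : Decidable (Spec_matches_text_query study query out) := by unfold Spec_matches_text_query; infer_instance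

-- ===== CLAIM (what is proved, stated in full; the proofs are below) =====
def Claim_equal_matches_text_query : Prop := ∀ (study : List (String × String)) (query : String), Dom_matches_text_query study query → Spec_matches_text_query study query (matches_text_query study query)

-- ===== LEMMAS AND PROOFS =====

-- a word with no occurrence of c is a prefix of u ++ c :: v iff it is a prefix of u
theorem pv_prefix_append_cons (t u v : List Char) (c : Char) (hc : c ∉ t) :
    t <+: u ++ c :: v ↔ t <+: u := by
  induction u generalizing t with
  | nil =>
    cases t with
    | nil => simp
    | cons x t' =>
      simp only [List.nil_append, List.cons_prefix_cons, List.prefix_nil]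
      constructor
      · rintro ⟨rfl, -⟩; exact absurd (List.mem_cons_self) hc
      · intro h; cases h
  | cons y u' ih =>
    cases t with
    | nil => simp
    | cons x t' =>
      simp only [List.cons_append, List.cons_prefix_cons]
      have : c ∉ t' := fun h => hc (List.mem_cons_of_mem _ h)
      rw [ih t' this]

-- a nonempty word with no occurrence of c is an infix of u ++ c :: v iff it is an infix of u or of v
theorem pv_infix_append_cons (t u v : List Char) (c : Char) (ht : t ≠ []) (hc : c ∉ t) :
    t <:+: u ++ c :: v ↔ t <:+: u ∨ t <:+: v := by
  induction u with
  | nil =>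
    simp only [List.nil_append, List.infix_cons_iff, List.infix_nil]
    constructor
    · rintro (h | h)
      · cases t with
        | nil => exact absurd rfl ht
        | cons x t' =>
          rw [List.cons_prefix_cons] at h
          exact absurd (h.1 ▸ List.mem_cons_self) hc
      · exact Or.inr h
    · rintro (h | h)
      · exact absurd h ht
      · exact Or.inr h
  | cons y u' ih =>
    rw [List.cons_append, List.infix_cons_iff, List.infix_cons_iff]
    rw [show y :: (u' ++ c :: v) = (y :: u') ++ c :: v from rfl,
        pv_prefix_append_cons t (y :: u') v c hc, ih]
    tauto

-- a nonempty space-free word is an infix of " ".join(fs) iff it is an infix of some field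
theorem pv_infix_intercalate (t : List Char) (fs : List (List Char)) (ht : t ≠ [])
    (hc : (' ' : Char) ∉ t) :
    t <:+: List.intercalate [' '] fs ↔ ∃ f ∈ fs, t <:+: f := by
  induction fs with
  | nil =>
    simp only [List.intercalate, List.intersperse, List.flatten, List.infix_nil]
    simp [ht]
  | cons f rest ih =>
    cases rest with
    | nil => simp [List.intercalate]
    | cons g rest' =>
      have hstep : List.intercalate [' '] (f :: g :: rest')
          = f ++ ' ' :: List.intercalate [' '] (g :: rest') := by
        simp [List.intercalate, List.intersperse]
      rw [hstep, pv_infix_append_cons t f _ ' ' ht hc, ih]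
      simp only [List.mem_cons]
      constructor
      · rintro (h | ⟨f', hf', h⟩)
        · exact ⟨f, Or.inl rfl, h⟩
        · exact ⟨f', Or.inr hf', h⟩
      · rintro ⟨f', (rfl | hf'), h⟩
        · exact Or.inl h
        · exact Or.inr ⟨f', hf', h⟩

-- map distributes over intercalate
theorem pv_map_intercalate (g : Char → Char) (sep : List Char) (l : List (List Char)) :
    List.map g (List.intercalate sep l)
      = List.intercalate (sep.map g) (l.map (List.map g)) := by
  induction l with
  | nil => simp [List.intercalate]
  | cons x rest ih =>
    cases rest with
    | nil => simp [List.intercalate]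
    | cons y rest' =>
      have h1 : List.intercalate sep (x :: y :: rest')
          = x ++ sep ++ List.intercalate sep (y :: rest') := by
        simp [List.intercalate, List.intersperse]
      have h2 : List.intercalate (sep.map g) (x.map g :: y.map g :: rest'.map (List.map g))
          = x.map g ++ sep.map g ++ List.intercalate (sep.map g) (y.map g :: rest'.map (List.map g)) := by
        simp [List.intercalate, List.intersperse]
      simp only [List.map_cons] at ih ⊢
      rw [h1, h2, ← ih]
      simp

-- every word produced by split() is nonempty and whitespace-free
theorem pv_split₀_go_words (s : List Char) : ∀ (cur : List Char) (acc : List (List Char)),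
    (∀ c ∈ cur, PySem.Chars.isspace c = false) →
    (∀ t ∈ acc, t ≠ [] ∧ ∀ c ∈ t, PySem.Chars.isspace c = false) →
    ∀ t ∈ PySem.Chars.split₀.go s cur acc, t ≠ [] ∧ ∀ c ∈ t, PySem.Chars.isspace c = false := by
  induction s with
  | nil =>
    intro cur acc hcur hacc t ht
    simp only [PySem.Chars.split₀.go] at ht
    split at ht
    · exact hacc t (List.mem_reverse.mp ht)
    · rw [List.mem_reverse, List.mem_cons] at ht
      rcases ht with rfl | ht
      · refine ⟨?_, fun c hc => hcur c (List.mem_reverse.mp hc)⟩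
        intro h
        have : cur = [] := by simpa using congrArg List.reverse h
        simp [this] at *
      · exact hacc t ht
  | cons c rest ih =>
    intro cur acc hcur hacc t ht
    simp only [PySem.Chars.split₀.go] at ht
    split at ht
    · split at ht
      · exact ih [] acc (by simp) hacc t ht
      · refine ih [] (cur.reverse :: acc) (by simp) ?_ t ht
        intro u hu
        rw [List.mem_cons] at hu
        rcases hu with rfl | hu
        · refine ⟨?_, fun c hc => hcur c (List.mem_reverse.mp hc)⟩
          intro h
          have : cur = [] := by simpa using congrArg List.reverse h
          simp [this] at *
        · exact hacc u hu
    · refine ih (c :: cur) acc ?_ hacc t ht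
      intro x hx
      rw [List.mem_cons] at hx
      rcases hx with rfl | hx
      · rename_i h; simpa using h
      · exact hcur x hx

theorem pv_split₀_words (s : List Char) :
    ∀ t ∈ PySem.Chars.split₀ s, t ≠ [] ∧ ∀ c ∈ t, PySem.Chars.isspace c = false := by
  intro t ht
  exact pv_split₀_go_words s [] [] (by simp) (by simp) t ht

-- ===== VERDICT (by name: the statement is the Claim_ definition above) =====
theorem matches_text_query_spec : Claim_equal_matches_text_query := by
  intro study query _
  unfold Spec_matches_text_query matches_text_query matches_text_query_alt
  by_cases hq : query.toList = []
  · simp [hq]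
  · simp only [hq, if_false]
    rw [Bool.eq_iff_iff, List.all_eq_true, List.all_eq_true]
    have key : ∀ term ∈ PySem.Str.split₀ (PySem.Str.lower query),
        (PySem.Str.isIn term (PySem.Str.lower (PySem.Str.join " "
          [(PySem.Dict.mk study).getD "Study Title" "",
           (PySem.Dict.mk study).getD "Primary Outcome Area" "",
           (PySem.Dict.mk study).getD "Secondary Outcome Area" "",
           (PySem.Dict.mk study).getD "Results: Primary measure" "",
           (PySem.Dict.mk study).getD "Results: Secondary Measures" "",
           (PySem.Dict.mk study).getD "Tolerability/Side Effects" "",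
           (PySem.Dict.mk study).getD "Safety" ""])) = true)
        ↔ ((pvSearchFields.map (fun k => PySem.Str.lower ((PySem.Dict.mk study).getD k ""))).any
             (fun f => PySem.Str.isIn term f) = true) := by
      intro term hterm
      have hmem : term.toList ∈ PySem.Chars.split₀ ((PySem.Str.lower query).toList) := by
        rw [← PySem.Str.split₀_map_toList]
        exact List.mem_map_of_mem hterm
      obtain ⟨hne, hns⟩ := pv_split₀_words _ _ hmem
      have hsp : (' ' : Char) ∉ term.toList := by
        intro h
        have := hns ' ' h
        simp [PySem.Chars.isspace] at this
      rw [PySem.Str.isIn_iff_infix, List.any_eq_true]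
      have hjoin : (PySem.Str.lower (PySem.Str.join " "
          [(PySem.Dict.mk study).getD "Study Title" "",
           (PySem.Dict.mk study).getD "Primary Outcome Area" "",
           (PySem.Dict.mk study).getD "Secondary Outcome Area" "",
           (PySem.Dict.mk study).getD "Results: Primary measure" "",
           (PySem.Dict.mk study).getD "Results: Secondary Measures" "",
           (PySem.Dict.mk study).getD "Tolerability/Side Effects" "",
           (PySem.Dict.mk study).getD "Safety" ""])).toList
          = List.intercalate [' ']
              ([(PySem.Dict.mk study).getD "Study Title" "",
                (PySem.Dict.mk study).getD "Primary Outcome Area" "",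
                (PySem.Dict.mk study).getD "Secondary Outcome Area" "",
                (PySem.Dict.mk study).getD "Results: Primary measure" "",
                (PySem.Dict.mk study).getD "Results: Secondary Measures" "",
                (PySem.Dict.mk study).getD "Tolerability/Side Effects" "",
                (PySem.Dict.mk study).getD "Safety" ""].map
                 (fun f => (PySem.Str.lower f).toList)) := by
        rw [PySem.Str.toList_lower, PySem.Str.toList_join]
        show PySem.Chars.lower (List.intercalate (" ".toList) _) = _
        rw [show (" " : String).toList = [' '] from rfl]
        show List.map PySem.Chars.lowerChar _ = _
        rw [pv_map_intercalate]
        simp only [List.map_map]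
        congr 1
        simp [Function.comp_def, PySem.Str.toList_lower, PySem.Chars.lower]
      rw [hjoin, pv_infix_intercalate _ _ hne hsp]
      constructor
      · rintro ⟨fl, hfl, h⟩
        rw [List.mem_map] at hfl
        obtain ⟨f, hf, rfl⟩ := hfl
        refine ⟨PySem.Str.lower f, ?_, ?_⟩
        · rw [List.mem_map]
          fin_cases hf <;>
            [exact ⟨"Study Title", by simp [pvSearchFields]⟩;
             exact ⟨"Primary Outcome Area", by simp [pvSearchFields]⟩;
             exact ⟨"Secondary Outcome Area", by simp [pvSearchFields]⟩;
             exact ⟨"Results: Primary measure", by simp [pvSearchFields]⟩;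
             exact ⟨"Results: Secondary Measures", by simp [pvSearchFields]⟩;
             exact ⟨"Tolerability/Side Effects", by simp [pvSearchFields]⟩;
             exact ⟨"Safety", by simp [pvSearchFields]⟩]
        · rw [PySem.Str.isIn_iff_infix]
          exact h
      · rintro ⟨g, hg, h⟩
        rw [PySem.Str.isIn_iff_infix] at h
        rw [List.mem_map] at hg
        obtain ⟨k, hk, rfl⟩ := hg
        refine ⟨(PySem.Str.lower ((PySem.Dict.mk study).getD k "")).toList, ?_, h⟩
        rw [List.mem_map]
        exact ⟨(PySem.Dict.mk study).getD k "", by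
          fin_cases hk <;> simp [pvSearchFields], rfl⟩
    exact ⟨fun h t ht => (key t ht).mp (h t ht), fun h t ht => (key t ht).mpr (h t ht)⟩
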